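-- pv_equiv track=rewrite | github.com/SiebeVCHoGent/DataEngineeringP2 | Scratches/scraper/website.py | remove_invalid_links
-- ===== SOURCE A (Python) =====
-- def remove_invalid_links(links, banned_domains):
--     '''removes invalid links from a list of links'''
--
--     if links is None or banned_domains is None:
--         raise ValueError('links or banned_domains is None')
--
--     cleaned_links = []
--
--     for link in links:
--         if str(link) in ('', 'nan'):
--             continue
--         if link.endswith('/'):
--             link = link[:-1]
--         if any((link for banned in banned_domains if banned in link)):
--             continue
--         cleaned_links.append(link)
--     return cleaned_links
-- ===== SOURCE B (Python) =====
-- def remove_invalid_links(links, banned_domains):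
--     '''removes invalid links from a list of links'''
--
--     if links is None or banned_domains is None:
--         raise ValueError('links or banned_domains is None')
--
--     survivors = []
--     for link in links:
--         if str(link) in ('', 'nan'):
--             continue
--         survivors.append(link[:-1] if link.endswith('/') else link)
--     # pattern-outer staged filtering: each banned domain prunes the whole list once
--     for banned in banned_domains:
--         survivors = [link for link in survivors if banned not in link]
--     return survivors
-- ===== Notes on version B (the rewrite author's own statement) =====
-- stated objective: alternative
-- what changed: Inverts the loop nesting: instead of checking every banned domain inside the per-link loop, B first normalises the links in one pass and then loops over banned_domains, pruning the surviving list once per pattern (staged filtering over a shrinking list); it also fixes A's truthiness slip in the any-generator.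
-- intended difference: When '' is in banned_domains and '/' is in links, A keeps the stripped-to-empty link '' (its any-generator yields the link itself, which is falsy when empty) while B drops it, which is intended since an empty banned domain is a substring of every link. — e.g. on remove_invalid_links(["/"], [""]): A returns [""], B returns []
import Mathlib
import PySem

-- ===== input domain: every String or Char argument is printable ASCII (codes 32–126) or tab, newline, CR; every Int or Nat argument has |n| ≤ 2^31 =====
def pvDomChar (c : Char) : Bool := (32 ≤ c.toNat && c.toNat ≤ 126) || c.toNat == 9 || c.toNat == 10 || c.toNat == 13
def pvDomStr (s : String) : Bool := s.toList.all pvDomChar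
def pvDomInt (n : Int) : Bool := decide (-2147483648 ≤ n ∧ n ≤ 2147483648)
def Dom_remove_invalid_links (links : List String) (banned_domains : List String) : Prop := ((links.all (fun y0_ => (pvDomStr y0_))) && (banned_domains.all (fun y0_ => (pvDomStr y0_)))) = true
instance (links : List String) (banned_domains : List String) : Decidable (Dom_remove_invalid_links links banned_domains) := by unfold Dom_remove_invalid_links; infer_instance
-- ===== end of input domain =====

-- B inverts A's loop nesting: one normalising pass over the links, then a loop over
-- banned_domains pruning the surviving list once per pattern (objective: alternative);
-- on the corner described at D_ below B intentionally differs from A.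

-- shared helper: both Pythons contain the expression  link[:-1] if link.endswith('/') else link
def pvStrip (link : String) : String :=
  if PySem.Str.endswith link "/" then PySem.Str.slice link none (some (-1)) else link

-- ===== PORT A =====
def remove_invalid_links (links : List String) (banned_domains : List String) : List String :=
  links.foldl
    (fun cleaned_links link =>
      if link = "" ∨ link = "nan" then cleaned_links
      else
        let link := pvStrip link
        -- any((link for banned in banned_domains if banned in link)): the generator
        -- yields LINK itself, so each candidate is truthy only when link ≠ ''
        if banned_domains.any (fun banned => PySem.Str.isIn banned link && !(link == "")) then
          cleaned_links
        else cleaned_links ++ [link])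
    []

-- ===== PORT B =====
def remove_invalid_links_alt (links : List String) (banned_domains : List String) : List String :=
  let survivors := links.foldl
    (fun survivors link =>
      if link == "" || link == "nan" then survivors
      else survivors ++ [pvStrip link]) []
  banned_domains.foldl
    (fun survivors banned => survivors.filter (fun link => !(PySem.Str.isIn banned link)))
    survivors

-- ===== PRECONDITION & SPEC =====
-- When '' ∈ banned_domains and '/' ∈ links, A keeps the stripped-to-empty link ''
-- (its any-generator yields the link itself, which is falsy when empty) while B drops
-- it; B's value is intended since an empty banned domain is a substring of every link.
def D_remove_invalid_links (links : List String) (banned_domains : List String) : Prop :=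
  "/" ∈ links ∧ "" ∈ banned_domains
instance (links : List String) (banned_domains : List String) : Decidable (D_remove_invalid_links links banned_domains) := by unfold D_remove_invalid_links; infer_instance

def Spec_remove_invalid_links (links : List String) (banned_domains : List String) (out : List String) : Prop := ¬ D_remove_invalid_links links banned_domains → out = remove_invalid_links_alt links banned_domains
instance (links : List String) (banned_domains : List String) (out : List String) : Decidable (Spec_remove_invalid_links links banned_domains out) := by unfold Spec_remove_invalid_links; infer_instance

def pvDiffWitness_remove_invalid_links : List String × List String := (["/"], [""])
def pvDiffWitnessOut_remove_invalid_links : (List String) × (List String) := ([""], [])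

-- ===== CLAIM (what is proved, stated in full; the proofs are below) =====
def Claim_unchanged_remove_invalid_links : Prop := ∀ (links : List String) (banned_domains : List String), Dom_remove_invalid_links links banned_domains → Spec_remove_invalid_links links banned_domains (remove_invalid_links links banned_domains)
def Claim_changed_remove_invalid_links : Prop := Dom_remove_invalid_links (pvDiffWitness_remove_invalid_links.1) (pvDiffWitness_remove_invalid_links.2) ∧ D_remove_invalid_links (pvDiffWitness_remove_invalid_links.1) (pvDiffWitness_remove_invalid_links.2) ∧ remove_invalid_links (pvDiffWitness_remove_invalid_links.1) (pvDiffWitness_remove_invalid_links.2) = pvDiffWitnessOut_remove_invalid_links.1 ∧ remove_invalid_links_alt (pvDiffWitness_remove_invalid_links.1) (pvDiffWitness_remove_invalid_links.2) = pvDiffWitnessOut_remove_invalid_links.2 ∧ pvDiffWitnessOut_remove_invalid_links.1 ≠ pvDiffWitnessOut_remove_invalid_links.2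
def Claim_exact_remove_invalid_links : Prop := ∀ (links : List String) (banned_domains : List String), Dom_remove_invalid_links links banned_domains → D_remove_invalid_links links banned_domains → remove_invalid_links links banned_domains ≠ remove_invalid_links_alt links banned_domains

-- ===== LEMMAS AND PROOFS =====

-- A's keep-condition per original link
def pvKeepA (banned_domains : List String) (link : String) : Bool :=
  !(link == "" || link == "nan") &&
    !(banned_domains.any (fun banned => PySem.Str.isIn banned (pvStrip link) && !(pvStrip link == "")))

lemma A_eq_filter_map (links banned_domains : List String) :
    remove_invalid_links links banned_domains
      = (links.filter (pvKeepA banned_domains)).map pvStrip := by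
  unfold remove_invalid_links
  have h : (fun (cleaned_links : List String) link =>
      if link = "" ∨ link = "nan" then cleaned_links
      else
        let link := pvStrip link
        if banned_domains.any (fun banned => PySem.Str.isIn banned link && !(link == "")) then
          cleaned_links
        else cleaned_links ++ [link])
      = (fun cleaned_links link =>
          if pvKeepA banned_domains link then cleaned_links ++ [pvStrip link] else cleaned_links) := by
    funext c l
    by_cases h1 : l = "" ∨ l = "nan"
    · have hb : pvKeepA banned_domains l = false := by
        simp only [pvKeepA]; rcases h1 with h | h <;> simp [h]
      rw [if_pos h1, hb]; simp
    · rw [if_neg h1]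
      have h0 : (l == "" || l == "nan") = false := by
        rw [not_or] at h1; simp [h1.1, h1.2]
      have hb : pvKeepA banned_domains l
          = !(banned_domains.any fun banned => PySem.Str.isIn banned (pvStrip l) && !(pvStrip l == "")) := by
        simp only [pvKeepA, h0, Bool.not_false, Bool.true_and]
      rw [hb]
      show (if (banned_domains.any fun banned => PySem.Str.isIn banned (pvStrip l) && !(pvStrip l == "")) = true
            then c else c ++ [pvStrip l]) = _
      cases banned_domains.any fun banned => PySem.Str.isIn banned (pvStrip l) && !(pvStrip l == "") <;> simp
  rw [h, PySem.List.foldl_append_if]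
  simp

-- B's staged filtering collapses to one filter with the disjunction of all patterns
lemma foldl_filter_staged (bs : List String) (xs : List String) :
    bs.foldl (fun acc banned => acc.filter (fun link => !(PySem.Str.isIn banned link))) xs
      = xs.filter (fun l => !(bs.any (fun banned => PySem.Str.isIn banned l))) := by
  induction bs generalizing xs with
  | nil => simp
  | cons b bs ih =>
    simp only [List.foldl_cons, ih, List.filter_filter, List.any_cons]
    congr 1
    funext l
    cases PySem.Str.isIn b l <;> simp

lemma B_eq_filter_map (links banned_domains : List String) :
    remove_invalid_links_alt links banned_domains
      = (links.filter (fun l =>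
          !(banned_domains.any (fun banned => PySem.Str.isIn banned (pvStrip l)))
            && !(l == "" || l == "nan"))).map pvStrip := by
  unfold remove_invalid_links_alt
  have h : links.foldl
      (fun survivors link =>
        if link == "" || link == "nan" then survivors
        else survivors ++ [pvStrip link]) []
      = (links.filter (fun l => !(l == "" || l == "nan"))).map pvStrip := by
    have hfun : (fun (survivors : List String) link =>
        if link == "" || link == "nan" then survivors
        else survivors ++ [pvStrip link])
        = (fun survivors link =>
            if (!(link == "" || link == "nan")) = true then survivors ++ [pvStrip link]
            else survivors) := by
      funext acc l
      cases hl : (l == "" || l == "nan") <;> simp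
    rw [hfun, PySem.List.foldl_append_if]
    simp only [List.nil_append]
  rw [h, foldl_filter_staged, List.filter_map, List.filter_filter]
  simp only [Function.comp]

lemma strip_ne_empty (l : String) (h1 : l ≠ "") (h2 : l ≠ "/") : pvStrip l ≠ "" := by
  unfold pvStrip
  split
  · rename_i he
    simp only [PySem.Str.endswith_eq] at he
    rw [PySem.Chars.endswith_iff] at he
    obtain ⟨t, ht⟩ := he
    have ht' : l.toList = t ++ ['/'] := by rw [← ht]; rfl
    intro hc
    have hd : l.toList.dropLast = [] := by
      have := congrArg String.toList hc
      rw [PySem.Str.slice_to_neg_one] at this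
      simpa using this
    rw [ht'] at hd
    simp at hd
    apply h2
    apply String.toList_inj.mp
    rw [ht', hd]
    rfl
  · exact h1

lemma isIn_empty_right (b : String) : PySem.Str.isIn b "" = (b == "") := by
  by_cases hb : b = ""
  · subst hb; decide
  · have h0 : (b == "") = false := by simp [hb]
    rw [h0]
    rcases h : PySem.Str.isIn b ""
    · rfl
    · exfalso
      rw [PySem.Str.isIn_iff_infix] at h
      simp at h
      exact hb (String.toList_inj.mp (by rw [h]))

theorem remove_invalid_links_spec : Claim_unchanged_remove_invalid_links := by
  intro links banned_domains _ hD
  rw [A_eq_filter_map, B_eq_filter_map]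
  congr 1
  apply List.filter_congr
  intro l hl
  simp only [pvKeepA]
  by_cases h0 : (l == "" || l == "nan") = true
  · rw [h0]; simp
  rw [Bool.and_comm]
  congr 1
  have h0' : l ≠ "" ∧ l ≠ "nan" := by simpa using h0
  by_cases hs : pvStrip l = ""
  · -- stripped link is empty: only l = '/' reaches this, so '' ∉ banned_domains
    have hl' : l = "/" := by
      by_contra hne
      exact strip_ne_empty l h0'.1 hne hs
    have hb : "" ∉ banned_domains := by
      intro hmem
      exact (not_and_or.mp (by unfold D_remove_invalid_links at hD; exact hD)).elim
        (fun h => h (hl' ▸ hl)) (fun h => h hmem)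
    have hA : (banned_domains.any fun banned =>
        PySem.Str.isIn banned (pvStrip l) && !(pvStrip l == "")) = false := by
      refine List.any_eq_false.mpr fun b hbm => ?_
      rw [hs]; simp
    have hB : (banned_domains.any fun banned => PySem.Str.isIn banned (pvStrip l)) = false := by
      rw [hs]
      simp only [List.any_eq_false]
      intro b hbm
      have hne : b ≠ "" := fun hc => hb (hc ▸ hbm)
      rw [isIn_empty_right]
      simp [hne]
    rw [hA, hB]
  · have he : (pvStrip l == "") = false := by simpa using hs
    have hfun : (fun banned => PySem.Str.isIn banned (pvStrip l) && !(pvStrip l == ""))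
        = (fun banned => PySem.Str.isIn banned (pvStrip l)) := by
      funext b; rw [he]; simp
    rw [hfun]

theorem remove_invalid_links_changed : Claim_changed_remove_invalid_links := by
  unfold Claim_changed_remove_invalid_links; decide

theorem remove_invalid_links_tight : Claim_exact_remove_invalid_links := by
  intro links banned_domains _ hD
  obtain ⟨hslash, hempty⟩ := hD
  intro hc
  -- B is empty: '' is a substring of everything
  have hB : remove_invalid_links_alt links banned_domains = [] := by
    rw [B_eq_filter_map]
    simp only [List.map_eq_nil_iff, List.filter_eq_nil_iff]
    intro l _
    have : banned_domains.any (fun banned => PySem.Str.isIn banned (pvStrip l)) = true := by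
      refine List.any_eq_true.mpr ⟨"", hempty, ?_⟩
      rw [PySem.Str.isIn_iff_infix]
      simp
    simp only [this, Bool.not_true, Bool.false_and]
    decide
  -- A contains '' (from the link '/')
  have hA : "" ∈ remove_invalid_links links banned_domains := by
    rw [A_eq_filter_map]
    have hstrip : pvStrip "/" = "" := by decide
    refine List.mem_map.mpr ⟨"/", List.mem_filter.mpr ⟨hslash, ?_⟩, hstrip⟩
    simp only [pvKeepA, hstrip]
    simp
  rw [hc, hB] at hA
  simp at hA
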